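-- pv_equiv track=rewrite | github.com/kys95/Programmers-Algolithm | 고득점Kit/스택큐/기능개발/solution.py | solution
-- ===== SOURCE A (Python) =====
-- from math import ceil
--
-- def solution(progresses, speeds):
--     daysLeft = list(map(lambda x: (ceil((100 - progresses[x]) / speeds[x])), range(len(progresses))))
--     count = 1
--     retList = []
--
--     for i in range(len(daysLeft)):
--         try:
--             if daysLeft[i] < daysLeft[i + 1]:
--                 retList.append(count)
--                 count = 1
--             else:
--                 daysLeft[i + 1] = daysLeft[i]
--                 count += 1
--         except IndexError:
--             retList.append(count)
--
--     return retList
-- ===== SOURCE B (Python) =====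
-- from math import ceil
-- from collections import deque
--
-- def solution(progresses, speeds):
--     q = deque(ceil((100 - p) / s) for p, s in zip(progresses, speeds))
--     ret = []
--     while q:
--         leader = q.popleft()
--         cnt = 1
--         while q and q[0] <= leader:
--             q.popleft()
--             cnt += 1
--         ret.append(cnt)
--     return ret
-- ===== Notes on version B (the rewrite author's own statement) =====
-- stated objective: alternative
-- what changed: Replaces A's single index loop that mutates daysLeft in place and catches IndexError with a deque simulation of the deployment process: an outer loop pops each group's leader and an inner while-loop pops all queued features whose days do not exceed the leader's.
import Mathlib
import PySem

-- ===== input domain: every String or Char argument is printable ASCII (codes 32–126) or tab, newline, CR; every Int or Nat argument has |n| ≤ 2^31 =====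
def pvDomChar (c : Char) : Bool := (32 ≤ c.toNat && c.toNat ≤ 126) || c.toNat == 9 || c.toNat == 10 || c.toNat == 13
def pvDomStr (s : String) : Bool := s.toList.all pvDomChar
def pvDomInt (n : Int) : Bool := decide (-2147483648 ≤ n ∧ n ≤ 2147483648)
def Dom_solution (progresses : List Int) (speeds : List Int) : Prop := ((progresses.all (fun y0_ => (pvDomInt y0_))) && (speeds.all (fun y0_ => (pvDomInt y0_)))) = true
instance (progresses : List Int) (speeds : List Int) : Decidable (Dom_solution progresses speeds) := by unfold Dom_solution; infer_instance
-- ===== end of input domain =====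

-- B replaces A's in-place-mutating try/except index loop with a queue simulation of the
-- deployment process (alternative decomposition; return value only, A does not observably
-- mutate its arguments).

-- ===== PORT A =====
-- ceil((100-p)/s): on Dom (|ints| ≤ 2^31) Python's float ceil of the quotient equals exact
-- ceiling division -((-a)//s), since |numerator| < 2^53 makes the float rounding cross no integer.
def pvCeilDiv (a b : Int) : Int := -(PySem.Int.floordiv (-a) b)

-- A's for-loop: `cur` carries daysLeft[i] after the in-place overwrite daysLeft[i+1] = daysLeft[i];
-- the except IndexError branch (last iteration) is the [] case appending the final count.
def solLoopA : Int → List Int → Int → List Int → List Int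
  | _cur, [], count, acc => acc ++ [count]
  | cur, next :: rest, count, acc =>
      if cur < next then solLoopA next rest 1 (acc ++ [count])
      else solLoopA cur rest (count + 1) acc

def solution (progresses : List Int) (speeds : List Int) : List Int :=
  let daysLeft := (PySem.List.pyRange 0 (progresses.length : Int) 1).map
    (fun x => pvCeilDiv (100 - PySem.List.pyGetD progresses x 0) (PySem.List.pyGetD speeds x 0))
  match daysLeft with
  | [] => []
  | d :: ds => solLoopA d ds 1 []

-- ===== PORT B =====
-- deque(ceil((100-p)/s) for p, s in zip(progresses, speeds))
def pvDaysLeftB (progresses : List Int) (speeds : List Int) : List Int :=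
  (progresses.zip speeds).map (fun ps => pvCeilDiv (100 - ps.1) ps.2)

-- inner `while q and q[0] <= leader: q.popleft(); cnt += 1` — returns (cnt, remaining queue)
def pvConsume : Int → Int → List Int → Int × List Int
  | _leader, cnt, [] => (cnt, [])
  | leader, cnt, y :: ys => if y ≤ leader then pvConsume leader (cnt + 1) ys else (cnt, y :: ys)

theorem pvConsume_len (leader cnt : Int) (ys : List Int) :
    (pvConsume leader cnt ys).2.length ≤ ys.length := by
  induction ys generalizing cnt with
  | nil => simp [pvConsume]
  | cons y ys ih =>
    rw [pvConsume]
    split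
    · exact le_trans (ih _) (by simp)
    · simp

-- outer `while q:` — pop the leader, consume its followers, append the count
def solBLoop (q : List Int) : List Int :=
  match q with
  | [] => []
  | d :: ds =>
      let r := pvConsume d 1 ds
      r.1 :: solBLoop r.2
termination_by q.length
decreasing_by
  have := pvConsume_len d 1 ds
  simp only [List.length_cons]
  omega

def solution_alt (progresses : List Int) (speeds : List Int) : List Int :=
  solBLoop (pvDaysLeftB progresses speeds)

-- ===== PRECONDITION & SPEC =====
-- Pre_ excludes exactly the inputs where A raises: IndexError when speeds is shorter than
-- progresses, ZeroDivisionError when some used speed is 0.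
def Pre_solution (progresses : List Int) (speeds : List Int) : Prop :=
  progresses.length ≤ speeds.length ∧ ∀ s ∈ speeds.take progresses.length, s ≠ 0
instance (progresses : List Int) (speeds : List Int) : Decidable (Pre_solution progresses speeds) := by unfold Pre_solution; infer_instance
def pvWitness_solution : List Int × List Int := ([93, 30, 55], [1, 30, 5])

def Spec_solution (progresses : List Int) (speeds : List Int) (out : List Int) : Prop := out = solution_alt progresses speeds
instance (progresses : List Int) (speeds : List Int) (out : List Int) : Decidable (Spec_solution progresses speeds out) := by unfold Spec_solution; infer_instance

-- ===== CLAIM (what is proved, stated in full; the proofs are below) =====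
def Claim_equal_solution : Prop := ∀ (progresses : List Int) (speeds : List Int), Dom_solution progresses speeds → Pre_solution progresses speeds → Spec_solution progresses speeds (solution progresses speeds)

-- ===== LEMMAS AND PROOFS =====

theorem solBLoop_nil : solBLoop [] = [] := by rw [solBLoop.eq_def]

theorem solBLoop_cons (d : Int) (ds : List Int) :
    solBLoop (d :: ds) = (pvConsume d 1 ds).1 :: solBLoop (pvConsume d 1 ds).2 := by
  rw [solBLoop.eq_def]

-- the two daysLeft computations agree when speeds is long enough
theorem daysLeft_eq (ps ss : List Int) (h : ps.length ≤ ss.length) :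
    (PySem.List.pyRange 0 (ps.length : Int) 1).map
      (fun x => pvCeilDiv (100 - PySem.List.pyGetD ps x 0) (PySem.List.pyGetD ss x 0))
    = pvDaysLeftB ps ss := by
  apply List.ext_getElem
  · simp [pvDaysLeftB, PySem.List.length_pyRange_one]
    omega
  · intro k h1 h2
    have hk : k < ps.length := by
      simpa [PySem.List.length_pyRange_one] using h1
    have hk' : k < ss.length := by omega
    simp [pvDaysLeftB, PySem.List.getElem_pyRange_one, PySem.List.pyGetD_natCast,
      List.getD_eq_getElem?_getD, hk, hk']

-- A's loop, at leader `cur` with running `count`, yields the same list as B's queue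
-- simulation continued from (pvConsume cur count ys): A's `count += 1` else-branch is B's
-- inner while, and A's `append; count = 1` branch is B's outer pop of the next leader.
theorem loopA_eq : ∀ (ys : List Int) (cur count : Int) (acc : List Int),
    solLoopA cur ys count acc
      = acc ++ (pvConsume cur count ys).1 :: solBLoop (pvConsume cur count ys).2 := by
  intro ys
  induction ys with
  | nil => intro cur count acc; simp [solLoopA, pvConsume, solBLoop_nil]
  | cons y ys ih =>
    intro cur count acc
    rw [solLoopA]
    by_cases h : cur < y
    · have hne : ¬ (y ≤ cur) := by omega
      rw [if_pos h, ih, pvConsume, if_neg hne, solBLoop_cons]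
      simp
    · have hle : y ≤ cur := by omega
      rw [if_neg h, ih, pvConsume, if_pos hle]

-- ===== VERDICT (by name: the statement is the Claim_ definition above) =====
theorem solution_spec : Claim_equal_solution := by
  intro ps ss _hdom hpre
  unfold Spec_solution solution solution_alt
  rw [daysLeft_eq ps ss hpre.1]
  cases hdl : pvDaysLeftB ps ss with
  | nil => simp [solBLoop_nil]
  | cons d ds =>
    rw [solBLoop_cons]
    simpa using loopA_eq ds d 1 []
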